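-- pv_equiv track=rewrite | github.com/eladk333/Ai-targil-2 | Assignments/Assignment2/ex2_ori.py | is_line_blocked
-- ===== SOURCE A (Python) =====
-- def is_line_blocked(start, end, broken_positions):
--     """ Checks if a broken robot is strictly between start and end in a straight line. """
--     r1, c1 = start
--     r2, c2 = end
--     for br, bc in broken_positions:
--         if c1 == c2 == bc:
--             if min(r1, r2) < br < max(r1, r2): return True
--         if r1 == r2 == br:
--             if min(c1, c2) < bc < max(c1, c2): return True
--     return False
-- ===== SOURCE B (Python) =====
-- def is_line_blocked(start, end, broken_positions):
--     """Sort-then-binary-search: index the collinear broken coordinates in sorted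
--     order, then find the least one exceeding the interval's lower bound."""
--     r1, c1 = start
--     r2, c2 = end
--     if c1 == c2 and r1 != r2:
--         coords = sorted(br for br, bc in broken_positions if bc == c1)
--         lo, hi = min(r1, r2), max(r1, r2)
--     elif r1 == r2 and c1 != c2:
--         coords = sorted(bc for br, bc in broken_positions if br == r1)
--         lo, hi = min(c1, c2), max(c1, c2)
--     else:
--         return False
--     # binary search: least index i with coords[i] > lo
--     i, j = 0, len(coords)
--     while i < j:
--         m = (i + j) // 2
--         if coords[m] <= lo:
--             i = m + 1
--         else:
--             j = m
--     return i < len(coords) and coords[i] < hi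
-- ===== Notes on version B (the rewrite author's own statement) =====
-- stated objective: alternative
-- what changed: B builds a sorted index of the broken coordinates lying on the segment's line and binary-searches it for the least coordinate above the interval's lower bound, deciding blockage by comparing that single successor with the upper bound, instead of A's linear scan testing each broken cell against both orientations.
import Mathlib
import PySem

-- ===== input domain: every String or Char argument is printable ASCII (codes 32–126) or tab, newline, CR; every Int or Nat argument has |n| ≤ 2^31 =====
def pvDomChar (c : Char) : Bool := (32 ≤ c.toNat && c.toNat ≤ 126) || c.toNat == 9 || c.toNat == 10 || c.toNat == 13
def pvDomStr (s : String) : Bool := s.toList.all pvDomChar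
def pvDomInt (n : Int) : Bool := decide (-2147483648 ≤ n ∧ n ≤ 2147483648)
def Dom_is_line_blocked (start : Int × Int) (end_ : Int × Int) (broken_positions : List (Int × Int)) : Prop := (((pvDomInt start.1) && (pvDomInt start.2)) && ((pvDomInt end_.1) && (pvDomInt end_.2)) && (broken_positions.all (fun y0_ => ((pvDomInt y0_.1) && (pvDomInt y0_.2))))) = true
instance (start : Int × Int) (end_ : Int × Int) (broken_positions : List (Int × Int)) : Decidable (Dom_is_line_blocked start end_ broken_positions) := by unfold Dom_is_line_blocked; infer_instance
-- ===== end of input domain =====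

-- B replaces A's linear scan by a sorted index of the collinear broken coordinates
-- plus a binary search for the successor of the interval's lower bound (objective: alternative).

-- ===== PORT A =====
-- A's loop over broken_positions with early return.
def isLBLoop (r1 c1 r2 c2 : Int) : List (Int × Int) → Bool
  | [] => false
  | (br, bc) :: rest =>
      if (c1 = c2 ∧ c2 = bc) ∧ (min r1 r2 < br ∧ br < max r1 r2) then true
      else if (r1 = r2 ∧ r2 = br) ∧ (min c1 c2 < bc ∧ bc < max c1 c2) then true
      else isLBLoop r1 c1 r2 c2 rest

def is_line_blocked (start : Int × Int) (end_ : Int × Int) (broken_positions : List (Int × Int)) : Bool :=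
  isLBLoop start.1 start.2 end_.1 end_.2 broken_positions

-- ===== PORT B =====
-- Source B's while-loop: least index i (in [i,j)) with coords[i] > lo; coords[m] is read
-- as getD m 0, exact here since every probed m satisfies m < j ≤ coords.length.
def firstGT (coords : List Int) (lo : Int) (i j : Nat) : Nat :=
  if _h : i < j then
    let m := (i + j) / 2
    if coords.getD m 0 ≤ lo then firstGT coords lo (m + 1) j else firstGT coords lo i m
  else i
termination_by j - i
decreasing_by all_goals omega

def is_line_blocked_alt (start : Int × Int) (end_ : Int × Int) (broken_positions : List (Int × Int)) : Bool :=
  let r1 := start.1; let c1 := start.2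
  let r2 := end_.1; let c2 := end_.2
  if c1 = c2 ∧ r1 ≠ r2 then
    let coords := PySem.List.sorted ((broken_positions.filter (fun p => p.2 == c1)).map Prod.fst) (fun x => x) false
    let lo := min r1 r2; let hi := max r1 r2
    let i := firstGT coords lo 0 coords.length
    decide (i < coords.length) && decide (coords.getD i 0 < hi)
  else if r1 = r2 ∧ c1 ≠ c2 then
    let coords := PySem.List.sorted ((broken_positions.filter (fun p => p.1 == r1)).map Prod.snd) (fun x => x) false
    let lo := min c1 c2; let hi := max c1 c2
    let i := firstGT coords lo 0 coords.length
    decide (i < coords.length) && decide (coords.getD i 0 < hi)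
  else false

-- ===== PRECONDITION & SPEC =====
def Spec_is_line_blocked (start : Int × Int) (end_ : Int × Int) (broken_positions : List (Int × Int)) (out : Bool) : Prop := out = is_line_blocked_alt start end_ broken_positions
instance (start : Int × Int) (end_ : Int × Int) (broken_positions : List (Int × Int)) (out : Bool) : Decidable (Spec_is_line_blocked start end_ broken_positions out) := by unfold Spec_is_line_blocked; infer_instance

-- ===== CLAIM (what is proved, stated in full; the proofs are below) =====
def Claim_equal_is_line_blocked : Prop := ∀ (start : Int × Int) (end_ : Int × Int) (broken_positions : List (Int × Int)), Dom_is_line_blocked start end_ broken_positions → Spec_is_line_blocked start end_ broken_positions (is_line_blocked start end_ broken_positions)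

-- ===== LEMMAS AND PROOFS =====
theorem isLBLoop_vert (r1 c1 r2 c2 : Int) (h : c1 = c2) (l : List (Int × Int)) :
    isLBLoop r1 c1 r2 c2 l =
      l.any (fun p => p.2 = c1 ∧ min r1 r2 < p.1 ∧ p.1 < max r1 r2) := by
  induction l with
  | nil => simp [isLBLoop]
  | cons p rest ih =>
      obtain ⟨br, bc⟩ := p
      simp only [isLBLoop, List.any_cons, ← ih]
      split_ifs with h1 h2
      · simp; omega
      · exfalso; omega
      · simp; omega

theorem isLBLoop_horiz (r1 c1 r2 c2 : Int) (h : r1 = r2) (l : List (Int × Int)) :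
    isLBLoop r1 c1 r2 c2 l =
      l.any (fun p => p.1 = r1 ∧ min c1 c2 < p.2 ∧ p.2 < max c1 c2) := by
  induction l with
  | nil => simp [isLBLoop]
  | cons p rest ih =>
      obtain ⟨br, bc⟩ := p
      simp only [isLBLoop, List.any_cons, ← ih]
      split_ifs with h1 h2
      · exfalso; omega
      · simp; omega
      · simp; omega

theorem isLBLoop_diag (r1 c1 r2 c2 : Int) (hr : r1 ≠ r2) (hc : c1 ≠ c2) (l : List (Int × Int)) :
    isLBLoop r1 c1 r2 c2 l = false := by
  induction l with
  | nil => simp [isLBLoop]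
  | cons p rest ih =>
      obtain ⟨br, bc⟩ := p
      simp only [isLBLoop]
      split_ifs with h1 h2
      · exact absurd h1.1.1 hc
      · exact absurd h2.1.1 hr
      · exact ih

-- binary-search invariant: if everything below i is ≤ lo and everything from j on is > lo,
-- the result r keeps both properties with j replaced by r itself.
theorem firstGT_inv (coords : List Int) (lo : Int)
    (hmono : ∀ p q : Nat, p ≤ q → q < coords.length → coords.getD p 0 ≤ coords.getD q 0) :
    ∀ (n i j : Nat), j - i ≤ n → i ≤ j → j ≤ coords.length →
    (∀ k : Nat, k < i → coords.getD k 0 ≤ lo) →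
    (∀ k : Nat, j ≤ k → k < coords.length → lo < coords.getD k 0) →
    (∀ k : Nat, k < firstGT coords lo i j → coords.getD k 0 ≤ lo) ∧
      (firstGT coords lo i j < coords.length → lo < coords.getD (firstGT coords lo i j) 0) ∧
      firstGT coords lo i j ≤ coords.length := by
  intro n
  induction n with
  | zero =>
      intro i j hn hij hj hlow hhigh
      have hji : i = j := by omega
      rw [firstGT]
      simp only [dif_neg (by omega : ¬ i < j)]
      exact ⟨hlow, fun hlt => hhigh i (by omega) hlt, by omega⟩
  | succ n ih =>
      intro i j hn hij hj hlow hhigh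
      rw [firstGT]
      by_cases h : i < j
      · simp only [dif_pos h]
        by_cases hle : coords.getD ((i + j) / 2) 0 ≤ lo
        · rw [if_pos hle]
          exact ih ((i + j) / 2 + 1) j (by omega) (by omega) hj
            (fun k hk => le_trans (hmono k ((i + j) / 2) (by omega) (by omega)) hle) hhigh
        · rw [if_neg hle]
          exact ih i ((i + j) / 2) (by omega) (by omega) (by omega) hlow
            (fun k hk hklen => lt_of_lt_of_le (lt_of_not_ge hle) (hmono ((i + j) / 2) k hk hklen))
      · simp only [dif_neg h]
        exact ⟨hlow, fun hlt => hhigh i (by omega) hlt, by omega⟩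

-- the binary-search answer decides "some element lies strictly inside (lo, hi)"
theorem firstGT_result (coords : List Int) (lo hi : Int)
    (hmono : ∀ p q : Nat, p ≤ q → q < coords.length → coords.getD p 0 ≤ coords.getD q 0) :
    ((decide (firstGT coords lo 0 coords.length < coords.length) &&
      decide (coords.getD (firstGT coords lo 0 coords.length) 0 < hi)) = true) ↔
      ∃ x ∈ coords, lo < x ∧ x < hi := by
  obtain ⟨hlow, hhigh, hle⟩ := firstGT_inv coords lo hmono coords.length 0 coords.length (by omega)
    (Nat.zero_le _) (le_refl _) (fun k hk => absurd hk (Nat.not_lt_zero k)) (fun k hk hklen => absurd hklen (by omega))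
  set r := firstGT coords lo 0 coords.length with hr
  constructor
  · rintro hb
    simp only [Bool.and_eq_true, decide_eq_true_eq] at hb
    obtain ⟨hrlen, hrhi⟩ := hb
    refine ⟨coords.getD r 0, ?_, hhigh hrlen, hrhi⟩
    simp only [List.getD_eq_getElem?_getD, List.getElem?_eq_getElem hrlen, Option.getD_some]
    exact List.getElem_mem hrlen
  · rintro ⟨x, hx, hlo, hhi⟩
    obtain ⟨t, ht, hxt⟩ := List.mem_iff_getElem.mp hx
    have hxt' : coords.getD t 0 = x := by
      simp [List.getD_eq_getElem?_getD, List.getElem?_eq_getElem ht, hxt]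
    have hrt : r ≤ t := by
      by_contra hcon
      have := hlow t (by omega)
      rw [hxt'] at this; omega
    have hrlen : r < coords.length := lt_of_le_of_lt hrt ht
    have : coords.getD r 0 ≤ coords.getD t 0 := hmono r t hrt ht
    simp only [Bool.and_eq_true, decide_eq_true_eq]
    exact ⟨hrlen, by rw [hxt'] at this; omega⟩

-- monotonicity of getD on a Python-sorted list
theorem sorted_getD_mono (xs : List Int) (p q : Nat) (hpq : p ≤ q)
    (hq : q < (PySem.List.sorted xs (fun x => x) false).length) :
    (PySem.List.sorted xs (fun x => x) false).getD p 0 ≤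
      (PySem.List.sorted xs (fun x => x) false).getD q 0 := by
  have hp : p < (PySem.List.sorted xs (fun x => x) false).length := lt_of_le_of_lt hpq hq
  rw [List.getD_eq_getElem?_getD, List.getElem?_eq_getElem hp,
      List.getD_eq_getElem?_getD, List.getElem?_eq_getElem hq]
  exact PySem.List.sorted_id_getElem_mono xs hpq hq

-- ===== VERDICT (by name: the statement is the Claim_ definition above) =====
theorem is_line_blocked_spec : Claim_equal_is_line_blocked := by
  intro ⟨r1, c1⟩ ⟨r2, c2⟩ bp _
  unfold Spec_is_line_blocked is_line_blocked is_line_blocked_alt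
  simp only []
  by_cases hc : c1 = c2
  · by_cases hr : r1 = r2
    · -- start = end up to both coordinates: A scans but every interval is empty
      rw [if_neg (by simp [hr]), if_neg (by simp [hc]), isLBLoop_vert r1 c1 r2 c2 hc]
      simp only [hr, hc]
      simp
      intro a b _ _
      omega
    · rw [if_pos ⟨hc, hr⟩, isLBLoop_vert r1 c1 r2 c2 hc]
      rw [Bool.eq_iff_iff]
      rw [firstGT_result _ _ _ (sorted_getD_mono _)]
      simp only [PySem.List.mem_sorted, List.mem_map, List.mem_filter]
      constructor
      · rintro h
        rw [List.any_eq_true] at h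
        obtain ⟨p, hp, hpred⟩ := h
        simp only [decide_eq_true_eq] at hpred
        exact ⟨p.1, ⟨p, ⟨hp, by simp [hpred.1]⟩, rfl⟩, hpred.2.1, hpred.2.2⟩
      · rintro ⟨x, ⟨p, ⟨hp, hpc⟩, hpx⟩, hlo, hhi⟩
        rw [List.any_eq_true]
        refine ⟨p, hp, ?_⟩
        simp only [decide_eq_true_eq]
        simp only [beq_iff_eq] at hpc
        exact ⟨hpc, by rw [hpx]; exact hlo, by rw [hpx]; exact hhi⟩
  · by_cases hr : r1 = r2
    · rw [if_neg (by simp [hc]), if_pos ⟨hr, hc⟩, isLBLoop_horiz r1 c1 r2 c2 hr]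
      rw [Bool.eq_iff_iff]
      rw [firstGT_result _ _ _ (sorted_getD_mono _)]
      simp only [PySem.List.mem_sorted, List.mem_map, List.mem_filter]
      constructor
      · rintro h
        rw [List.any_eq_true] at h
        obtain ⟨p, hp, hpred⟩ := h
        simp only [decide_eq_true_eq] at hpred
        exact ⟨p.2, ⟨p, ⟨hp, by simp [hpred.1]⟩, rfl⟩, hpred.2.1, hpred.2.2⟩
      · rintro ⟨x, ⟨p, ⟨hp, hpr⟩, hpx⟩, hlo, hhi⟩
        rw [List.any_eq_true]
        refine ⟨p, hp, ?_⟩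
        simp only [decide_eq_true_eq]
        simp only [beq_iff_eq] at hpr
        exact ⟨hpr, by rw [hpx]; exact hlo, by rw [hpx]; exact hhi⟩
    · rw [if_neg (by simp [hc]), if_neg (by simp [hr]), isLBLoop_diag r1 c1 r2 c2 hr hc]
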